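-- pv_equiv track=rewrite | github.com/4006G2/AutoMod | automod/chatbot/chatbot.py | same_msg
-- ===== SOURCE A (Python) =====
-- def same_msg(msg_lst):
--     same = False
--     for i in range(len(msg_lst)-1):
--         if msg_lst[i][1] == msg_lst[i+1][1]:
--             same = True
--         else:
--             return False
--     return same
-- ===== SOURCE B (Python) =====
-- def same_msg(msg_lst):
--     return len(msg_lst) > 1 and len({m[1] for m in msg_lst}) == 1
-- ===== Notes on version B (the rewrite author's own statement) =====
-- stated objective: alternative
-- what changed: Replaced the index-based adjacent-pair scan with a mutable flag by collecting all second fields into a set and testing that its cardinality is exactly 1 (with a length>1 guard).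
import Mathlib
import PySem

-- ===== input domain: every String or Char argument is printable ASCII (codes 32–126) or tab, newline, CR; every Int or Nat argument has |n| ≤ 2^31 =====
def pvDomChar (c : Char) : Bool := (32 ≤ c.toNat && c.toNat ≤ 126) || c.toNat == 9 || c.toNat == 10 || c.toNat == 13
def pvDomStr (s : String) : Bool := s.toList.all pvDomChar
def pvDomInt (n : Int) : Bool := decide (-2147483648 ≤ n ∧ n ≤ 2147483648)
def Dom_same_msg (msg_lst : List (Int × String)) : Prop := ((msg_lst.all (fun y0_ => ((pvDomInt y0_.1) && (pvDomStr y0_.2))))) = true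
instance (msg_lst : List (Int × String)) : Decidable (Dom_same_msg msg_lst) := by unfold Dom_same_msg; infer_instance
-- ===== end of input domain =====

-- B replaces A's early-returning adjacent-pair scan with a mutable flag by a
-- set-cardinality test: collect the distinct second fields and check there is
-- exactly one (alternative formulation, same asymptotic cost).

-- ===== PORT A =====
-- the loop 'for i in range(len-1)' with the mutable 'same' flag and early 'return False'
def same_msg_loop (msg_lst : List (Int × String)) : List Int → Bool → Bool
  | [], same => same
  | i :: rest, same =>
    match PySem.List.pyGet? msg_lst i, PySem.List.pyGet? msg_lst (i + 1) with
    | some a, some b =>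
      if a.2 == b.2 then same_msg_loop msg_lst rest true else false
    | _, _ => false  -- unreachable: range(len-1) keeps i and i+1 in range
  termination_by l => l.length

def same_msg (msg_lst : List (Int × String)) : Bool :=
  same_msg_loop msg_lst (PySem.List.pyRange 0 ((msg_lst.length : Int) - 1) 1) false

-- ===== PORT B =====
-- 'len(msg_lst) > 1 and len({m[1] for m in msg_lst}) == 1'
def same_msg_alt (msg_lst : List (Int × String)) : Bool :=
  decide ((msg_lst.length : Int) > 1) &&
    (PySem.Set.len (PySem.Set.ofList (msg_lst.map (fun m => m.2))) == 1)

-- ===== PRECONDITION & SPEC =====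
def Spec_same_msg (msg_lst : List (Int × String)) (out : Bool) : Prop := out = same_msg_alt msg_lst
instance (msg_lst : List (Int × String)) (out : Bool) : Decidable (Spec_same_msg msg_lst out) := by unfold Spec_same_msg; infer_instance

-- ===== CLAIM (what is proved, stated in full; the proofs are below) =====
def Claim_equal_same_msg : Prop := ∀ (msg_lst : List (Int × String)), Dom_same_msg msg_lst → Spec_same_msg msg_lst (same_msg msg_lst)

-- ===== LEMMAS AND PROOFS =====

-- pure-list reading of A's loop: adjacent-pair chain with the flag
def chain : List (Int × String) → Bool → Bool
  | a :: b :: r, _ => if a.2 == b.2 then chain (b :: r) true else false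
  | _, s => s

lemma loop_eq (msg_lst : List (Int × String)) :
    ∀ (i : Nat) (s : Bool),
      same_msg_loop msg_lst (PySem.List.pyRange (i : Int) ((msg_lst.length : Int) - 1) 1) s
        = chain (msg_lst.drop i) s := by
  intro i
  induction hk : msg_lst.length - i generalizing i with
  | zero =>
    intro s
    have hle : msg_lst.length ≤ i := by omega
    rw [PySem.List.pyRange_one_eq_nil (by omega)]
    rw [List.drop_eq_nil_of_le hle]
    simp [same_msg_loop, chain]
  | succ k ih =>
    intro s
    have hi : i < msg_lst.length := by omega
    by_cases h2 : i + 1 < msg_lst.length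
    · rw [PySem.List.pyRange_one_cons (by push_cast; omega)]
      have ha : PySem.List.pyGet? msg_lst (i : Int) = some msg_lst[i] :=
        PySem.List.pyGet?_ofNat msg_lst i hi
      have hb : PySem.List.pyGet? msg_lst ((i : Int) + 1) = some msg_lst[i+1] := by
        have := PySem.List.pyGet?_ofNat msg_lst (i + 1) h2
        simpa [Nat.cast_add] using this
      rw [same_msg_loop, ha, hb]
      dsimp only
      have hdrop : msg_lst.drop i = msg_lst[i] :: msg_lst[i+1] :: msg_lst.drop (i + 2) := by
        rw [List.drop_eq_getElem_cons hi, List.drop_eq_getElem_cons h2]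
      rw [hdrop, chain]
      split_ifs with heq
      · have := ih (i + 1) (by omega) true
        rw [show ((i : Int) + 1) = ((i + 1 : Nat) : Int) by push_cast; ring]
        rw [this, List.drop_eq_getElem_cons h2]
      · rfl
    · have hlen : msg_lst.length = i + 1 := by omega
      rw [PySem.List.pyRange_one_eq_nil (by push_cast; omega)]
      have : msg_lst.drop i = [msg_lst[i]] := by
        rw [List.drop_eq_getElem_cons hi]
        simp [List.drop_eq_nil_of_le, hlen]
      simp [same_msg_loop, this, chain]

-- the chain with the flag set is 'all later values equal the head value'
lemma chain_true (x : Int × String) (rest : List (Int × String)) :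
    chain (x :: rest) true = rest.all (fun m => m.2 == x.2) := by
  induction rest generalizing x with
  | nil => simp [chain]
  | cons y r ih =>
    rw [chain]
    by_cases h : x.2 = y.2
    · rw [if_pos (by simp [h]), ih y]
      simp [List.all_cons, h]
    · have hb : (x.2 == y.2) = false := by simp [beq_iff_eq, h]
      have hyx : (y.2 == x.2) = false := by
        simp only [beq_eq_false_iff_ne, ne_eq]
        exact fun hh => h hh.symm
      simp [hb, List.all_cons, hyx]

-- set(a :: a :: l) = set(a :: l)
lemma ofList_dup (a : String) (l : List String) :
    PySem.Set.ofList (a :: a :: l) = PySem.Set.ofList (a :: l) := by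
  rw [PySem.Set.ofList_eq_foldl, PySem.Set.ofList_eq_foldl]
  simp only [List.foldl_cons]
  rw [PySem.Set.add_of_mem ((PySem.Set.mem_add _ _ _).2 (Or.inr rfl))]

-- 'all elements equal a' is exactly 'the set of a :: l has one element'
lemma all_eq_iff_set_len (a : String) (l : List String) :
    l.all (fun v => v == a) = (PySem.Set.len (PySem.Set.ofList (a :: l)) == 1) := by
  rw [PySem.Set.ofList_cons]
  by_cases h : ∀ x ∈ l, x = a
  · have hnil : PySem.Set.discard (PySem.Set.ofList l) a = [] := by
      rw [List.eq_nil_iff_forall_not_mem]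
      intro x hx
      rw [PySem.Set.mem_discard] at hx
      exact hx.2 (h x ((PySem.Set.mem_ofList l x).1 hx.1))
    rw [hnil]
    have : l.all (fun v => v == a) = true := List.all_eq_true.2 (by
      intro x hx; simpa using h x hx)
    rw [this]
    simp [PySem.Set.len]
  · push_neg at h
    obtain ⟨x, hx, hxa⟩ := h
    have hmem : x ∈ PySem.Set.discard (PySem.Set.ofList l) a := by
      rw [PySem.Set.mem_discard]
      exact ⟨(PySem.Set.mem_ofList l x).2 hx, hxa⟩
    have hall : l.all (fun v => v == a) = false :=
      List.all_eq_false.2 ⟨x, hx, by simp [hxa]⟩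
    rw [hall]
    cases hd : PySem.Set.discard (PySem.Set.ofList l) a with
    | nil => rw [hd] at hmem; exact absurd hmem (List.not_mem_nil)
    | cons z zs =>
      simp [PySem.Set.len]
      omega

-- ===== VERDICT (by name: the statement is the Claim_ definition above) =====
theorem same_msg_spec : Claim_equal_same_msg := by
  intro msg_lst _
  unfold Spec_same_msg same_msg
  have h0 := loop_eq msg_lst 0 false
  simp only [Nat.cast_zero, List.drop_zero] at h0
  rw [h0]
  match msg_lst with
  | [] => rfl
  | [x] => simp [chain, same_msg_alt, PySem.Set.len]
  | x :: y :: r =>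
    have hguard : decide (((x :: y :: r : List (Int × String)).length : Int) > 1) = true := by
      simp only [List.length_cons]; push_cast; simp
    unfold same_msg_alt
    rw [hguard, Bool.true_and]
    have hmap : (x :: y :: r).map (fun m : Int × String => m.2)
        = x.2 :: y.2 :: r.map (fun m => m.2) := rfl
    rw [hmap]
    by_cases h : x.2 = y.2
    · rw [chain, if_pos (by simp [h]), chain_true, h, ofList_dup,
          ← all_eq_iff_set_len]
      simp [Function.comp_def]
    · have hb : (x.2 == y.2) = false := by
        simp only [beq_eq_false_iff_ne, ne_eq]; exact h
      rw [chain, if_neg (by rw [hb]; exact Bool.false_ne_true)]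
      have hfalse : (y.2 :: r.map (fun m => m.2)).all (fun v => v == x.2) = false :=
        List.all_eq_false.2 ⟨y.2, List.mem_cons_self, by
          simp only [beq_iff_eq]; exact fun hh => h hh.symm⟩
      have hlen := all_eq_iff_set_len x.2 (y.2 :: r.map (fun m => m.2))
      rw [hfalse] at hlen
      exact hlen
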